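-- pv_equiv track=rewrite | github.com/alekz/advent-python | advent/year2024/day17/day17.py | combine_valid_values
-- ===== SOURCE A (Python) =====
-- def combine_valid_values(prev: list[int], this: list[int], index: int = 0) -> list[int]:
--     bits = 3 * index
--     values = set()
--     for x in this:
--         x_test = x & 0b1111111
--         for y in prev:
--             y_test = y >> bits
--             is_compatible = (x_test ^ y_test) == 0
--             if is_compatible:
--                 values.add((x << bits) | y)
--     return list(sorted(values))
-- ===== SOURCE B (Python) =====
-- def combine_valid_values(prev: list[int], this: list[int], index: int = 0) -> list[int]:
--     bits = 3 * index
--     groups = {}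
--     for y in prev:
--         groups.setdefault(y >> bits, []).append(y)
--     values = set()
--     for x in this:
--         for y in groups.get(x & 0b1111111, ()):
--             values.add((x << bits) | y)
--     return sorted(values)
-- ===== Notes on version B (the rewrite author's own statement) =====
-- stated objective: faster
-- what changed: Instead of testing every (x, y) pair with a nested loop, B groups prev into a dict keyed by y >> bits once and for each x looks up the single bucket x & 0b1111111, so the inner scan over prev disappears.
-- outside the precondition, e.g. on combine_valid_values([-4641], [], -2): A returns [], B raises ValueError
import Mathlib
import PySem

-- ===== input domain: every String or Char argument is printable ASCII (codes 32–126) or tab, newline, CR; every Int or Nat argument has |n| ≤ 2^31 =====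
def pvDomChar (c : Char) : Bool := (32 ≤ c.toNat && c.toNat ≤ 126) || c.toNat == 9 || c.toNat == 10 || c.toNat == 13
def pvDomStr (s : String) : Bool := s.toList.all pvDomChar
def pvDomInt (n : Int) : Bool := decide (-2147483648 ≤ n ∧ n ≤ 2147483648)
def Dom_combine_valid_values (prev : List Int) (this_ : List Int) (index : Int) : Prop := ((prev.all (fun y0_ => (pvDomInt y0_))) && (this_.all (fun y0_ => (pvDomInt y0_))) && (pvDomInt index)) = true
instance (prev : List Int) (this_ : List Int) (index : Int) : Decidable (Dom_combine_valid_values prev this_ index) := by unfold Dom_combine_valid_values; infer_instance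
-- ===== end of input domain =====

-- B replaces A's nested scan over prev by a one-pass dict grouping prev by (y >> bits)
-- with a single bucket lookup per x (objective: faster, asymptotic).

-- ===== PORT A =====
def combine_valid_values (prev : List Int) (this_ : List Int) (index : Int) : List Int :=
  let bits := (3 * index).toNat   -- Pre_ guarantees 0 ≤ index (Python raises on a negative shift)
  let values : PySem.Set Int :=
    this_.foldl (fun values x =>
      let x_test := PySem.Int.band x 127
      prev.foldl (fun values (y : Int) =>
        let y_test := y >>> bits
        let is_compatible := PySem.Int.bxor x_test y_test == 0
        if is_compatible then PySem.Set.add values (PySem.Int.bor (x <<< bits) y) else values)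
        values)
      PySem.Set.empty
  PySem.List.sorted values (fun v => v) false

-- ===== PORT B =====
def combine_valid_values_alt (prev : List Int) (this_ : List Int) (index : Int) : List Int :=
  let bits := (3 * index).toNat   -- Pre_ guarantees 0 ≤ index (Python raises on a negative shift)
  let groups : PySem.Dict Int (List Int) :=
    prev.foldl (fun g (y : Int) => PySem.Dict.modify g (y >>> bits) [] (fun l => l ++ [y]))
      PySem.Dict.empty
  let values : PySem.Set Int :=
    this_.foldl (fun values x =>
      (PySem.Dict.getD groups (PySem.Int.band x 127) []).foldl
        (fun values (y : Int) => PySem.Set.add values (PySem.Int.bor (x <<< bits) y))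
        values)
      PySem.Set.empty
  PySem.List.sorted values (fun v => v) false

-- ===== PRECONDITION & SPEC =====
-- Pre_ excludes only index < 0: there Python A raises ValueError (negative shift count) whenever both lists
-- are nonempty, and when 'this' is empty A returns [] only because the shift is never reached, while B
-- (which shifts while grouping prev) naturally raises.
def Pre_combine_valid_values (prev : List Int) (this_ : List Int) (index : Int) : Prop := 0 ≤ index
instance (prev : List Int) (this_ : List Int) (index : Int) : Decidable (Pre_combine_valid_values prev this_ index) := by unfold Pre_combine_valid_values; infer_instance
def pvWitness_combine_valid_values : List Int × List Int × Int := ([9, 1], [1, 130], 0)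

def Spec_combine_valid_values (prev : List Int) (this_ : List Int) (index : Int) (out : List Int) : Prop := out = combine_valid_values_alt prev this_ index
instance (prev : List Int) (this_ : List Int) (index : Int) (out : List Int) : Decidable (Spec_combine_valid_values prev this_ index out) := by unfold Spec_combine_valid_values; infer_instance

-- ===== CLAIM (what is proved, stated in full; the proofs are below) =====
def Claim_equal_combine_valid_values : Prop := ∀ (prev : List Int) (this_ : List Int) (index : Int), Dom_combine_valid_values prev this_ index → Pre_combine_valid_values prev this_ index → Spec_combine_valid_values prev this_ index (combine_valid_values prev this_ index)

-- ===== LEMMAS AND PROOFS =====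

theorem bxor_eq_zero_iff (a b : Int) : PySem.Int.bxor a b = 0 ↔ a = b := by
  unfold PySem.Int.bxor
  split_ifs with h1 h2 h2 <;> constructor <;> intro h
  · have hx : a.toNat ^^^ b.toNat = 0 := by exact_mod_cast h
    have := Nat.xor_eq_zero_iff.mp hx; omega
  · subst h; simp
  · exfalso; have : (0:Int) ≤ ((a.toNat ^^^ (-b - 1).toNat : Nat) : Int) := Int.natCast_nonneg _
    omega
  · omega
  · exfalso; have : (0:Int) ≤ (((-a - 1).toNat ^^^ b.toNat : Nat) : Int) := Int.natCast_nonneg _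
    omega
  · omega
  · have hx : (-a - 1).toNat ^^^ (-b - 1).toNat = 0 := by exact_mod_cast h
    have := Nat.xor_eq_zero_iff.mp hx; omega
  · subst h; simp

-- membership in A's conditional set-building inner loop
theorem mem_foldl_add_if (p : Int → Bool) (f : Int → Int) :
    ∀ (l : List Int) (s : PySem.Set Int) (v : Int),
      (v ∈ l.foldl (fun s y => if p y then PySem.Set.add s (f y) else s) s) ↔
        v ∈ s ∨ ∃ y ∈ l, p y = true ∧ v = f y := by
  intro l
  induction l with
  | nil => simp
  | cons a t ih =>
    intro s v
    simp only [List.foldl_cons, ih]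
    by_cases hp : p a = true <;>
      simp only [hp, if_true, Bool.false_eq_true, if_false, PySem.Set.mem_add, List.mem_cons]
    · constructor
      · rintro ((h | rfl) | ⟨y, hy, hc, hv⟩)
        · exact Or.inl h
        · exact Or.inr ⟨a, Or.inl rfl, hp, rfl⟩
        · exact Or.inr ⟨y, Or.inr hy, hc, hv⟩
      · rintro (h | ⟨y, rfl | hy, hc, hv⟩)
        · exact Or.inl (Or.inl h)
        · exact Or.inl (Or.inr hv)
        · exact Or.inr ⟨y, hy, hc, hv⟩
    · constructor
      · rintro (h | ⟨y, hy, hc, hv⟩)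
        · exact Or.inl h
        · exact Or.inr ⟨y, Or.inr hy, hc, hv⟩
      · rintro (h | ⟨y, rfl | hy, hc, hv⟩)
        · exact Or.inl h
        · exact absurd hc hp
        · exact Or.inr ⟨y, hy, hc, hv⟩

theorem nodup_foldl_add_if (p : Int → Bool) (f : Int → Int) :
    ∀ (l : List Int) (s : PySem.Set Int), s.Nodup →
      (l.foldl (fun s y => if p y then PySem.Set.add s (f y) else s) s).Nodup := by
  intro l
  induction l with
  | nil => intro s hs; simpa
  | cons a t ih =>
    intro s hs
    simp only [List.foldl_cons]
    by_cases hp : p a = true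
    · simp only [hp, if_true]; exact ih _ (PySem.Set.nodup_add _ _ hs)
    · simp only [hp, Bool.false_eq_true, if_false]; exact ih _ hs

theorem nodup_foldl_add (f : Int → Int) :
    ∀ (l : List Int) (s : PySem.Set Int), s.Nodup →
      (l.foldl (fun s y => PySem.Set.add s (f y)) s).Nodup := by
  intro l
  induction l with
  | nil => intro s hs; simpa
  | cons a t ih => intro s hs; exact ih _ (PySem.Set.nodup_add _ _ hs)

-- the dict built by B: each bucket k holds exactly the y ∈ prev with y >>> bits = k, in order
theorem groups_getD (bits : Nat) :
    ∀ (l : List Int) (d : PySem.Dict Int (List Int)) (k : Int),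
      PySem.Dict.getD
          (l.foldl (fun g (y : Int) => PySem.Dict.modify g (y >>> bits) [] (fun l => l ++ [y])) d) k []
        = PySem.Dict.getD d k [] ++ l.filter (fun (y : Int) => decide (y >>> bits = k)) := by
  intro l
  induction l with
  | nil => simp
  | cons a t ih =>
    intro d k
    simp only [List.foldl_cons, ih, List.filter_cons]
    rw [PySem.Dict.getD_modify]
    by_cases hk : k = a >>> bits
    · simp [hk, List.append_assoc]
    · have : ¬ (a >>> bits = k) := fun h => hk h.symm
      simp [hk, this]

-- A's set: v collected iff some pair (x, y) matches
theorem memA (bits : Nat) (prev : List Int) :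
    ∀ (l : List Int) (s : PySem.Set Int) (v : Int),
      (v ∈ l.foldl (fun values x =>
          prev.foldl (fun values (y : Int) =>
            if (PySem.Int.bxor (PySem.Int.band x 127) (y >>> bits) == 0) then
              PySem.Set.add values (PySem.Int.bor (x <<< bits) y)
            else values) values) s) ↔
        v ∈ s ∨ ∃ x ∈ l, ∃ y ∈ prev,
          PySem.Int.band x 127 = y >>> bits ∧ v = PySem.Int.bor (x <<< bits) y := by
  intro l
  induction l with
  | nil => simp
  | cons a t ih =>
    intro s v
    simp only [List.foldl_cons, ih, mem_foldl_add_if]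
    constructor
    · rintro ((h | ⟨y, hy, hc, hv⟩) | ⟨x, hx, y, hy, hc, hv⟩)
      · exact Or.inl h
      · exact Or.inr ⟨a, by simp, y, hy, (bxor_eq_zero_iff _ _).mp (by simpa using hc), hv⟩
      · exact Or.inr ⟨x, by simp [hx], y, hy, hc, hv⟩
    · rintro (h | ⟨x, hx, y, hy, hc, hv⟩)
      · exact Or.inl (Or.inl h)
      · rcases List.mem_cons.mp hx with rfl | hx
        · exact Or.inl (Or.inr ⟨y, hy, by simp [(bxor_eq_zero_iff _ _).mpr hc], hv⟩)
        · exact Or.inr ⟨x, hx, y, hy, hc, hv⟩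

theorem nodupA (bits : Nat) (prev : List Int) :
    ∀ (l : List Int) (s : PySem.Set Int), s.Nodup →
      (l.foldl (fun values x =>
          prev.foldl (fun values (y : Int) =>
            if (PySem.Int.bxor (PySem.Int.band x 127) (y >>> bits) == 0) then
              PySem.Set.add values (PySem.Int.bor (x <<< bits) y)
            else values) values) s).Nodup := by
  intro l
  induction l with
  | nil => intro s hs; simpa
  | cons a t ih =>
    intro s hs
    exact ih _ (nodup_foldl_add_if _ _ prev s hs)

-- B's set: same characterisation
theorem memB (bits : Nat) (prev : List Int)
    (groups : PySem.Dict Int (List Int))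
    (hg : ∀ k, PySem.Dict.getD groups k [] = prev.filter (fun (y : Int) => decide (y >>> bits = k))) :
    ∀ (l : List Int) (s : PySem.Set Int) (v : Int),
      (v ∈ l.foldl (fun values x =>
          (PySem.Dict.getD groups (PySem.Int.band x 127) []).foldl
            (fun values (y : Int) => PySem.Set.add values (PySem.Int.bor (x <<< bits) y)) values) s) ↔
        v ∈ s ∨ ∃ x ∈ l, ∃ y ∈ prev,
          PySem.Int.band x 127 = y >>> bits ∧ v = PySem.Int.bor (x <<< bits) y := by
  intro l
  induction l with
  | nil => simp
  | cons a t ih =>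
    intro s v
    rw [List.foldl_cons, ih]
    simp only [PySem.Set.mem_foldl_add, hg, List.mem_filter, List.mem_cons]
    constructor
    · rintro ((h | ⟨y, ⟨hy, hc⟩, hv⟩) | ⟨x, hx, y, hy, hc, hv⟩)
      · exact Or.inl h
      · refine Or.inr ⟨a, Or.inl rfl, y, hy, ?_, hv⟩
        have h' : (y >>> bits : Int) = PySem.Int.band a 127 := by simpa using hc
        exact h'.symm
      · exact Or.inr ⟨x, Or.inr hx, y, hy, hc, hv⟩
    · rintro (h | ⟨x, rfl | hx, y, hy, hc, hv⟩)
      · exact Or.inl (Or.inl h)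
      · exact Or.inl (Or.inr ⟨y, ⟨hy, by simp [hc.symm]⟩, hv⟩)
      · exact Or.inr ⟨x, hx, y, hy, hc, hv⟩

theorem nodupB (bits : Nat) (groups : PySem.Dict Int (List Int)) :
    ∀ (l : List Int) (s : PySem.Set Int), s.Nodup →
      (l.foldl (fun values x =>
          (PySem.Dict.getD groups (PySem.Int.band x 127) []).foldl
            (fun values (y : Int) => PySem.Set.add values (PySem.Int.bor (x <<< bits) y)) values) s).Nodup := by
  intro l
  induction l with
  | nil => intro s hs; simpa
  | cons a t ih =>
    intro s hs
    exact ih _ (nodup_foldl_add _ _ _ hs)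

-- ===== VERDICT (by name: the statement is the Claim_ definition above) =====
theorem combine_valid_values_spec : Claim_equal_combine_valid_values := by
  intro prev this_ index _ _
  unfold Spec_combine_valid_values combine_valid_values combine_valid_values_alt
  set bits := (3 * index).toNat with hbits
  apply PySem.List.sorted_eq_sorted_of_perm _ _ _ (fun a b h => h)
  apply (List.perm_ext_iff_of_nodup _ _).mpr
  · intro v
    rw [memA bits prev this_ PySem.Set.empty v,
        memB bits prev _ (fun k => by
          rw [groups_getD bits prev PySem.Dict.empty k]; simp) this_ PySem.Set.empty v]
  · exact nodupA bits prev this_ _ (by simp [PySem.Set.empty])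
  · exact nodupB bits _ this_ _ (by simp [PySem.Set.empty])
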